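-- pv_equiv track=rewrite | github.com/dylmill8/Python-Programming | ATCS/Lab02/Lab02RecursionMenu.py | digitsToWords
-- ===== SOURCE A (Python) =====
-- def digitsToWords(n):
--     #if there are no more digits returns an empty string
--     if n == 0:
--         return ""
--     #creates a list with all the digits written in words zero through nine
--     words = ["zero","one","two","three","four","five","six","seven","eight","nine"]
--     #takes the remainder after dividing by 10 to get the last
--     #digit of the number
--     digit = n%10
--     #removed the last digit from the original number
--     n = n//10
--     #recalls the function on the remaining number and adds
--     #each digit now written out as a string
--     string = words[digit]+" "
--     return digitsToWords(n) + string
-- ===== SOURCE B (Python) =====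
-- def digitsToWords(n):
--     words = ["zero","one","two","three","four","five","six","seven","eight","nine"]
--     digits = []
--     while n != 0:
--         digits.append(n % 10)
--         n //= 10
--     return "".join(words[d] + " " for d in reversed(digits))
-- ===== Notes on version B (the rewrite author's own statement) =====
-- stated objective: alternative
-- what changed: Replaces A's recursion (recurse on n//10, append word after the recursive call) by an iterative two-phase version: a while loop collects the digits least-significant-first, then a join over the reversed digit list builds the string.
import Mathlib
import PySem

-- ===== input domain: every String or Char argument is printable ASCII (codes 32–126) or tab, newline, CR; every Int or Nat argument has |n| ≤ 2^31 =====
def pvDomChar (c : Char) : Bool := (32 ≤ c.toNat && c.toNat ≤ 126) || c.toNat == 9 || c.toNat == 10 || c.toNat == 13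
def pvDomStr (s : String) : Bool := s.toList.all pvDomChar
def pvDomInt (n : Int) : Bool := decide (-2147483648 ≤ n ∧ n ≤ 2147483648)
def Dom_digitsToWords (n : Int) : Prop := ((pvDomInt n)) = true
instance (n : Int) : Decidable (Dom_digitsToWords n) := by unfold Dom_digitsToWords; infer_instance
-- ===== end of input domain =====

-- B replaces A's recursion by an iterative digit-collection loop plus a join; same cost (objective: alternative).
-- Pre_ excludes n < 0, where Python A raises RecursionError (infinite recursion) and B loops forever.


-- ===== PORT A =====
def pvWords : List String := ["zero","one","two","three","four","five","six","seven","eight","nine"]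

-- A's recursion, made total with fuel (n.toNat + 1 fuel always suffices on the n ≥ 0 domain)
def digitsToWordsA : Nat → Int → String
  | 0, _ => ""
  | fuel + 1, n =>
    if n = 0 then ""
    else
      let digit := PySem.Int.mod n 10
      let string := (PySem.List.pyGet? pvWords digit).getD "" ++ " "
      digitsToWordsA fuel (PySem.Int.floordiv n 10) ++ string

def digitsToWords (n : Int) : String := digitsToWordsA (n.toNat + 1) n

-- ===== PORT B =====
-- while n != 0: digits.append(n % 10); n //= 10   (same fuel guard makes it total)
def pvCollectDigits : Nat → Int → List Int
  | 0, _ => []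
  | fuel + 1, n =>
    if n = 0 then []
    else PySem.Int.mod n 10 :: pvCollectDigits fuel (PySem.Int.floordiv n 10)

def digitsToWords_alt (n : Int) : String :=
  String.join (((pvCollectDigits (n.toNat + 1) n).reverse).map
    (fun d => (PySem.List.pyGet? pvWords d).getD "" ++ " "))

-- ===== PRECONDITION & SPEC =====
-- Pre_ excludes n < 0: there Python A recurses forever (RecursionError) and Python B's while loop never ends.
def Pre_digitsToWords (n : Int) : Prop := 0 ≤ n
instance (n : Int) : Decidable (Pre_digitsToWords n) := by unfold Pre_digitsToWords; infer_instance
def pvWitness_digitsToWords : Int := (42)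

def Spec_digitsToWords (n : Int) (out : String) : Prop := out = digitsToWords_alt n
instance (n : Int) (out : String) : Decidable (Spec_digitsToWords n out) := by unfold Spec_digitsToWords; infer_instance

-- ===== CLAIM (what is proved, stated in full; the proofs are below) =====
def Claim_equal_digitsToWords : Prop := ∀ (n : Int), Dom_digitsToWords n → Pre_digitsToWords n → Spec_digitsToWords n (digitsToWords n)

-- ===== LEMMAS AND PROOFS =====

-- With the same fuel, A's recursion equals B's collect-then-join, for every fuel and every n.
theorem digitsToWordsA_eq (fuel : Nat) (n : Int) :
    digitsToWordsA fuel n =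
      String.join ((pvCollectDigits fuel n).reverse.map
        (fun d => (PySem.List.pyGet? pvWords d).getD "" ++ " ")) := by
  induction fuel generalizing n with
  | zero => simp [digitsToWordsA, pvCollectDigits, String.join]
  | succ f ih =>
    by_cases h : n = 0
    · simp [digitsToWordsA, pvCollectDigits, h, String.join]
    · simp only [digitsToWordsA, pvCollectDigits, if_neg h, List.reverse_cons,
        List.map_append, List.map_cons, List.map_nil, ih]
      simp [String.join, List.foldl_append]

-- ===== VERDICT (by name: the statement is the Claim_ definition above) =====
theorem digitsToWords_spec : Claim_equal_digitsToWords := by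
  intro n _ _
  unfold Spec_digitsToWords digitsToWords digitsToWords_alt
  exact digitsToWordsA_eq _ _
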